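-- pv_equiv track=rewrite | github.com/Faiderasp/Programacion-1 | Parcial_2/ejercicios_faider.py | generar_calendario
-- ===== SOURCE A (Python) =====
-- def es_bisiesto(anio: int) -> bool:
--     """
--     Determina si un año es bisiesto aplicando las reglas del calendario gregoriano.
--     """
--     # Uso una lógica con divisiones y comprobaciones encadenadas distinta en forma
--     if anio % 400 == 0:
--         return True
--     if anio % 100 == 0:
--         return False
--     return anio % 4 == 0
--
-- def dias_en_mes(mes: int, anio: int) -> int:
--     """
--     Retorna la cantidad de días que tiene un mes en un año dado.
--     Valida el mes y usa la comprobación de bisiesto para febrero.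
--     """
--     if not (1 <= mes <= 12):
--         raise ValueError("Mes inválido: debe estar entre 1 y 12")
--     # Meses con 31 días
--     if mes in (1, 3, 5, 7, 8, 10, 12):
--         return 31
--     if mes in (4, 6, 9, 11):
--         return 30
--     # febrero
--     return 29 if es_bisiesto(anio) else 28
--
-- def generar_calendario(mes: int, anio: int, dia_inicio: int = 0) -> str:
--     """
--     Genera un calendario en texto para un mes y año dados.
--     dia_inicio: 0=Lunes, 6=Domingo.
--     """
--     # Cabecera simplificada
--     nombres = ["Lu", "Ma", "Mi", "Ju", "Vi", "Sa", "Do"]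
--     try:
--         dias = dias_en_mes(mes, anio)
--     except ValueError:
--         return ""
--
--     if not (0 <= dia_inicio <= 6):
--         raise ValueError("dia_inicio debe estar entre 0 y 6")
--
--     # Construyo las filas semana por semana
--     semanas = []
--     semana = ["  "] * 7
--     dia = 1
--     posicion = dia_inicio
--     # Relleno primera semana desde dia_inicio
--     while dia <= dias:
--         semana[posicion] = f"{dia:2d}"
--         posicion += 1
--         if posicion == 7:
--             semanas.append(" ".join(semana))
--             semana = ["  "] * 7
--             posicion = 0
--         dia += 1
--     # Si quedó parcial, la añado
--     if any(cell.strip() for cell in semana):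
--         semanas.append(" ".join(semana))
--
--     resultado = " ".join(nombres) + "\n" + "\n".join(semanas)
--     return resultado
-- ===== SOURCE B (Python) =====
-- def es_bisiesto(anio: int) -> bool:
--     """
--     Determina si un año es bisiesto aplicando las reglas del calendario gregoriano.
--     """
--     if anio % 400 == 0:
--         return True
--     if anio % 100 == 0:
--         return False
--     return anio % 4 == 0
--
-- def dias_en_mes(mes: int, anio: int) -> int:
--     """
--     Retorna la cantidad de días que tiene un mes en un año dado.
--     """
--     if not (1 <= mes <= 12):
--         raise ValueError("Mes inválido: debe estar entre 1 y 12")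
--     if mes in (1, 3, 5, 7, 8, 10, 12):
--         return 31
--     if mes in (4, 6, 9, 11):
--         return 30
--     return 29 if es_bisiesto(anio) else 28
--
-- def generar_calendario(mes: int, anio: int, dia_inicio: int = 0) -> str:
--     """
--     Genera un calendario en texto para un mes y año dados (0=Lunes .. 6=Domingo).
--     Construccion plana: una lista de celdas rellenada y troceada en filas de 7.
--     """
--     nombres = ["Lu", "Ma", "Mi", "Ju", "Vi", "Sa", "Do"]
--     try:
--         dias = dias_en_mes(mes, anio)
--     except ValueError:
--         return ""
--     if not (0 <= dia_inicio <= 6):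
--         raise ValueError("dia_inicio debe estar entre 0 y 6")
--     cells = ["  "] * dia_inicio + [f"{d:2d}" for d in range(1, dias + 1)]
--     if len(cells) % 7:
--         cells += ["  "] * (7 - len(cells) % 7)
--     rows = [" ".join(cells[i:i + 7]) for i in range(0, len(cells), 7)]
--     return " ".join(nombres) + "\n" + "\n".join(rows)
-- ===== Notes on version B (the rewrite author's own statement) =====
-- stated objective: simpler
-- what changed: Replaces A's week-by-week while-loop with mutable week/position state by building one flat list of cells (leading blanks plus formatted day numbers), padding it to a multiple of 7 only when the last week is partial, and chunking it into rows of 7 by slicing.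
-- outside the precondition, e.g. on generar_calendario(2, 2024, 7): A raises ValueError, B raises ValueError
import Mathlib
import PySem

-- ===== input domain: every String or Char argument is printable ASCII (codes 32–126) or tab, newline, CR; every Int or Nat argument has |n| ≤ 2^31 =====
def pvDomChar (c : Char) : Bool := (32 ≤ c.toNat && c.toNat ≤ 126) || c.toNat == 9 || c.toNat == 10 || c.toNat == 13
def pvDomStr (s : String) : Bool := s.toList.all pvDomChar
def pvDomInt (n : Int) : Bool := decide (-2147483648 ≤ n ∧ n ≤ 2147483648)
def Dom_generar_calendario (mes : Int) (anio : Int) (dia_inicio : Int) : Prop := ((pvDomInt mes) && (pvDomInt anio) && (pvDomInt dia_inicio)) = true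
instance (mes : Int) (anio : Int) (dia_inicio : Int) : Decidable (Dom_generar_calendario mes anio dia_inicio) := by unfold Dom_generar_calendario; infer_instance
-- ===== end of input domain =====

-- B replaces A's week-by-week while-loop with imperative cell/row/position state by a flat
-- cell list (blanks ++ formatted days), padded to a multiple of 7 only when the last week is
-- partial, then chunked into rows of 7 by slicing — objective: simpler decomposition.
-- Where Python raises ValueError (dia_inicio outside 0..6 with a valid month), both ports
-- return "" as a placeholder; those inputs are excluded by Pre_generar_calendario.

-- ===== PORT A =====
-- shared helper (identical in Source A and Source B): es_bisiesto
def es_bisiesto (anio : Int) : Bool :=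
  if PySem.Int.mod anio 400 == 0 then true
  else if PySem.Int.mod anio 100 == 0 then false
  else PySem.Int.mod anio 4 == 0

-- shared helper (identical in Source A and Source B): dias_en_mes; none = ValueError
def dias_en_mes (mes : Int) (anio : Int) : Option Int :=
  if ¬(1 ≤ mes ∧ mes ≤ 12) then none
  else if ([1, 3, 5, 7, 8, 10, 12] : List Int).contains mes then some 31
  else if ([4, 6, 9, 11] : List Int).contains mes then some 30
  else some (if es_bisiesto anio then 29 else 28)

-- f"{d:2d}": right-align to width 2 with a space; exact for width 2
def fmt2 (d : Int) : String :=
  let s := PySem.Int.toStr d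
  if PySem.Str.len s < 2 then PySem.Str.join "" [" ", s] else s

-- one iteration of A's while-loop; state = (semanas, semana, posicion)
def stepA (st : List String × List String × Int) (dia : Int) :
    List String × List String × Int :=
  let semana := st.2.1.set st.2.2.toNat (fmt2 dia)   -- posicion is always 0..6 here
  let pos := st.2.2 + 1
  if pos == 7 then (st.1 ++ [PySem.Str.join " " semana], List.replicate 7 "  ", (0 : Int))
  else (st.1, semana, pos)

-- the part of A after the validations, for given dias and dia_inicio
def bodyA (dias : Int) (dia_inicio : Int) : String :=
  let st := (PySem.List.pyRange 1 (dias + 1) 1).foldl stepA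
              ([], List.replicate 7 "  ", dia_inicio)
  let semanas :=
    if st.2.1.any (fun c => !(PySem.Str.strip c == "")) then
      st.1 ++ [PySem.Str.join " " st.2.1]
    else st.1
  PySem.Str.join ""
    [PySem.Str.join " " ["Lu", "Ma", "Mi", "Ju", "Vi", "Sa", "Do"], "\n",
     PySem.Str.join "\n" semanas]

def generar_calendario (mes : Int) (anio : Int) (dia_inicio : Int) : String :=
  match dias_en_mes mes anio with
  | none => ""                                        -- except ValueError: return ""
  | some dias =>
    if ¬(0 ≤ dia_inicio ∧ dia_inicio ≤ 6) then ""     -- Python raises here; outside Pre_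
    else bodyA dias dia_inicio

-- ===== PORT B =====
-- the part of B after the validations, for given dias and dia_inicio
def bodyB (dias : Int) (dia_inicio : Int) : String :=
  let cells := List.replicate dia_inicio.toNat "  " ++
               (PySem.List.pyRange 1 (dias + 1) 1).map fmt2
  let cells :=
    if PySem.Int.mod (PySem.List.len cells) 7 ≠ 0 then
      cells ++ List.replicate (7 - PySem.Int.mod (PySem.List.len cells) 7).toNat "  "
    else cells
  let rows := (PySem.List.pyRange 0 (PySem.List.len cells) 7).map
                (fun i => PySem.Str.join " " (PySem.List.slice cells (some i) (some (i + 7))))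
  PySem.Str.join ""
    [PySem.Str.join " " ["Lu", "Ma", "Mi", "Ju", "Vi", "Sa", "Do"], "\n",
     PySem.Str.join "\n" rows]

def generar_calendario_alt (mes : Int) (anio : Int) (dia_inicio : Int) : String :=
  match dias_en_mes mes anio with
  | none => ""                                        -- except ValueError: return ""
  | some dias =>
    if ¬(0 ≤ dia_inicio ∧ dia_inicio ≤ 6) then ""     -- Python raises here; outside Pre_
    else bodyB dias dia_inicio

-- ===== PRECONDITION & SPEC =====
-- Pre_ excludes exactly the inputs where A raises ValueError: a valid month (1..12)
-- together with dia_inicio outside 0..6. (With an invalid month A returns "" first.)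
def Pre_generar_calendario (mes : Int) (anio : Int) (dia_inicio : Int) : Prop :=
  ¬(1 ≤ mes ∧ mes ≤ 12) ∨ (0 ≤ dia_inicio ∧ dia_inicio ≤ 6)
instance (mes : Int) (anio : Int) (dia_inicio : Int) : Decidable (Pre_generar_calendario mes anio dia_inicio) := by unfold Pre_generar_calendario; infer_instance

def pvWitness_generar_calendario : Int × Int × Int := (2, 2024, 2)

def Spec_generar_calendario (mes : Int) (anio : Int) (dia_inicio : Int) (out : String) : Prop := out = generar_calendario_alt mes anio dia_inicio
instance (mes : Int) (anio : Int) (dia_inicio : Int) (out : String) : Decidable (Spec_generar_calendario mes anio dia_inicio out) := by unfold Spec_generar_calendario; infer_instance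

-- ===== CLAIM (what is proved, stated in full; the proofs are below) =====
def Claim_equal_generar_calendario : Prop := ∀ (mes : Int) (anio : Int) (dia_inicio : Int), Dom_generar_calendario mes anio dia_inicio → Pre_generar_calendario mes anio dia_inicio → Spec_generar_calendario mes anio dia_inicio (generar_calendario mes anio dia_inicio)

-- ===== LEMMAS AND PROOFS =====

lemma dias_en_mes_valid {mes anio d : Int} (h : dias_en_mes mes anio = some d) :
    1 ≤ mes ∧ mes ≤ 12 := by
  unfold dias_en_mes at h
  by_cases hv : 1 ≤ mes ∧ mes ≤ 12
  · exact hv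
  · simp [hv] at h

lemma dias_en_mes_range {mes anio d : Int} (h : dias_en_mes mes anio = some d) :
    d = 28 ∨ d = 29 ∨ d = 30 ∨ d = 31 := by
  unfold dias_en_mes at h
  split_ifs at h with h1 h2 h3 <;> simp_all

set_option maxRecDepth 20000 in
set_option maxHeartbeats 1000000 in
lemma bodies_eq (d di : Int)
    (hd : d = 28 ∨ d = 29 ∨ d = 30 ∨ d = 31)
    (hdi : di = 0 ∨ di = 1 ∨ di = 2 ∨ di = 3 ∨ di = 4 ∨ di = 5 ∨ di = 6) :
    bodyA d di = bodyB d di := by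
  rcases hd with rfl | rfl | rfl | rfl <;>
    rcases hdi with rfl | rfl | rfl | rfl | rfl | rfl | rfl <;> rfl

-- ===== VERDICT (by name: the statement is the Claim_ definition above) =====
theorem generar_calendario_spec : Claim_equal_generar_calendario := by
  intro mes anio di _ hpre
  unfold Spec_generar_calendario generar_calendario generar_calendario_alt
  cases h : dias_en_mes mes anio with
  | none => rfl
  | some d =>
    have hv := dias_en_mes_valid h
    have hdi : 0 ≤ di ∧ di ≤ 6 := by
      rcases hpre with hbad | hok
      · exact absurd hv hbad
      · exact hok
    have hcond : ¬¬(0 ≤ di ∧ di ≤ 6) := not_not_intro hdi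
    simp only [hcond, if_false]
    exact bodies_eq d di (dias_en_mes_range h) (by omega)
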